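-- pv_equiv track=rewrite | github.com/rubelw/OSSS | src/OSSS/ai/agents/query_data/handlers/live_scorings_handler.py | _select_live_scorings_fields
-- ===== SOURCE A (Python) =====
-- from typing import Any, Dict, List, Sequence
--
-- def _select_live_scorings_fields(
--     rows: Sequence[Dict[str, Any]],
-- ) -> List[str]:
--     if not rows:
--         return []
--
--     preferred_order = [
--         "id",
--         "event_id",
--         "event_name",
--         "sport",
--         "level",
--         "team_home",
--         "team_away",
--         "score_home",
--         "score_away",
--         "period",
--         "clock",
--         "status",
--         "location",
--         "updated_at",
--         "created_at",
--     ]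
--
--     all_keys: List[str] = []
--     for r in rows:
--         for k in r:
--             if k not in all_keys:
--                 all_keys.append(k)
--
--     ordered = [k for k in preferred_order if k in all_keys]
--     ordered.extend(k for k in all_keys if k not in ordered)
--     return ordered
-- ===== SOURCE B (Python) =====
-- from typing import Any, Dict, List, Sequence
--
-- def _select_live_scorings_fields(
--     rows: Sequence[Dict[str, Any]],
-- ) -> List[str]:
--     preferred_order = [
--         "id",
--         "event_id",
--         "event_name",
--         "sport",
--         "level",
--         "team_home",
--         "team_away",
--         "score_home",
--         "score_away",
--         "period",
--         "clock",
--         "status",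
--         "location",
--         "updated_at",
--         "created_at",
--     ]
--     rank = {k: i for i, k in enumerate(preferred_order)}
--     seen: Dict[str, None] = {}
--     for r in rows:
--         for k in r:
--             seen[k] = None
--     return sorted(seen, key=lambda k: rank.get(k, len(preferred_order)))
-- ===== Notes on version B (the rewrite author's own statement) =====
-- stated objective: faster
-- what changed: Replaces A's three staged list passes (dedup by linear membership scans, preferred filter, growing-list extend with membership on the growing result) by a dict-based dedup plus a single stable sort keyed on each key's rank in the preferred order (absent keys rank last, so stability keeps them in first-seen order).
import Mathlib
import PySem

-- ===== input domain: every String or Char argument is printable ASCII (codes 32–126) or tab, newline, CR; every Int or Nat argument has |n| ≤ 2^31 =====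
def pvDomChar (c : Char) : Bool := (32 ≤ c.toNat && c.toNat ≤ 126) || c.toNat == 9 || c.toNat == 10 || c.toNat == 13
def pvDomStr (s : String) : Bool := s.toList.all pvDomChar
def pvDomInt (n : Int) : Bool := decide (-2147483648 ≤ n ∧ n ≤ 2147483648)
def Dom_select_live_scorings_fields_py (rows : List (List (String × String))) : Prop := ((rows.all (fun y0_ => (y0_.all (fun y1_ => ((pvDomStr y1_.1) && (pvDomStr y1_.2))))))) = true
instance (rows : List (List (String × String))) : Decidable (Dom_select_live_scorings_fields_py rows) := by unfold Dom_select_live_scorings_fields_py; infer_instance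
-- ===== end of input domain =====

-- B replaces A's three staged passes (dedup-by-scan, preferred filter, growing-list extend)
-- by one dict-based dedup followed by a single stable sort keyed on each key's preferred rank.

-- ===== PORT A =====
-- the shared literal preferred_order list (data only, used by both ports)
def pvPreferred : List String :=
  ["id", "event_id", "event_name", "sport", "level", "team_home", "team_away",
   "score_home", "score_away", "period", "clock", "status", "location",
   "updated_at", "created_at"]

def select_live_scorings_fields_py (rows : List (List (String × String))) : List String :=
  if rows = [] then []
  else
    let preferred_order := pvPreferred
    -- all_keys: append each key not yet present (first-seen order)
    let all_keys : List String :=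
      rows.foldl (fun acc r =>
        r.foldl (fun a kv => if a.contains kv.1 then a else a ++ [kv.1]) acc) []
    -- ordered = [k for k in preferred_order if k in all_keys]
    let ordered := preferred_order.filter (fun k => all_keys.contains k)
    -- ordered.extend(k for k in all_keys if k not in ordered)  (membership sees the growing list)
    all_keys.foldl (fun o k => if o.contains k then o else o ++ [k]) ordered

-- ===== PORT B =====
def select_live_scorings_fields_py_alt (rows : List (List (String × String))) : List String :=
  let preferred_order := pvPreferred
  -- rank = {k: i for i, k in enumerate(preferred_order)}
  let rank : PySem.Dict String Int :=
    (PySem.List.enumerate preferred_order).foldl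
      (fun d p => d.insert p.2 p.1) PySem.Dict.empty
  -- seen = {}; for r in rows: for k in r: seen[k] = None
  let seen : PySem.Dict String (Option Unit) :=
    rows.foldl (fun d r => r.foldl (fun d kv => d.insert kv.1 none) d) PySem.Dict.empty
  -- sorted(seen, key=lambda k: rank.get(k, len(preferred_order)))
  PySem.List.sorted seen.keys (fun k => rank.getD k (preferred_order.length : Int)) false

-- ===== PRECONDITION & SPEC =====
def Spec_select_live_scorings_fields_py (rows : List (List (String × String))) (out : List String) : Prop := out = select_live_scorings_fields_py_alt rows
instance (rows : List (List (String × String))) (out : List String) : Decidable (Spec_select_live_scorings_fields_py rows out) := by unfold Spec_select_live_scorings_fields_py; infer_instance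

-- ===== CLAIM =====
def Claim_equal_select_live_scorings_fields_py : Prop := ∀ (rows : List (List (String × String))), Dom_select_live_scorings_fields_py rows → Spec_select_live_scorings_fields_py rows (select_live_scorings_fields_py rows)

-- ===== LEMMAS AND PROOFS =====

-- the rank dict of the B port, as a literal
def pvRankDict : PySem.Dict String Int :=
  PySem.Dict.mk [("id", 0), ("event_id", 1), ("event_name", 2), ("sport", 3), ("level", 4),
    ("team_home", 5), ("team_away", 6), ("score_home", 7), ("score_away", 8), ("period", 9),
    ("clock", 10), ("status", 11), ("location", 12), ("updated_at", 13), ("created_at", 14)]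

-- the B port's sort key
def pvKey (k : String) : Int := PySem.Dict.getD pvRankDict k 15

-- the common result: preferred keys that occur, then the remaining keys in first-seen order
def pvTarget (s : List String) : List String :=
  pvPreferred.filter (fun k => s.contains k) ++ s.filter (fun k => !pvPreferred.contains k)

theorem pvRankDict_keys : pvRankDict.keys = pvPreferred := by decide

theorem pvKey_le (k : String) : pvKey k ≤ 15 := by
  unfold pvKey
  cases h : pvRankDict.get? k with
  | none => simp [PySem.Dict.getD, h]
  | some v =>
    have hv : (k, v) ∈ pvRankDict.items := by
      apply PySem.Dict.mem_items_of_get?_eq_some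
      exact h
    have hall : ∀ p ∈ pvRankDict.items, p.2 ≤ 15 := by decide
    have := hall _ hv
    simp [PySem.Dict.getD, h]
    omega

theorem pvKey_not_mem {k : String} (h : k ∉ pvPreferred) : pvKey k = 15 := by
  have hk : pvRankDict.get? k = none := by
    rw [PySem.Dict.get?_eq_none_iff_not_mem_keys, pvRankDict_keys]
    exact h
  simp [pvKey, PySem.Dict.getD, hk]

theorem pvKey_mem_lt : ∀ k ∈ pvPreferred, pvKey k < 15 := by decide

theorem pvPreferred_pairwise : pvPreferred.Pairwise (fun a b => pvKey a < pvKey b) := by decide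

theorem pvPreferred_nodup : pvPreferred.Nodup := by decide

-- insertBy places x after a prefix it is not before, and before a suffix it is before
theorem pvInsertBy_middle (bf : String → String → Bool) (x : String) (A B : List String)
    (hA : ∀ a ∈ A, bf x a = false) (hB : ∀ b ∈ B, bf x b = true) :
    PySem.List.insertBy bf x (A ++ B) = A ++ x :: B := by
  induction A with
  | nil =>
    cases B with
    | nil => simp [PySem.List.insertBy]
    | cons b B => simp [PySem.List.insertBy, hB b (List.mem_cons_self)]
  | cons a A ih =>
    simp only [List.cons_append, PySem.List.insertBy, hA a (List.mem_cons_self),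
      Bool.false_eq_true, if_false]
    rw [ih (fun a ha => hA a (List.mem_cons_of_mem _ ha))]

-- the stable sort by pvKey of a duplicate-free key list is exactly pvTarget
theorem pvSorted_target (s : List String) (h : s.Nodup) :
    PySem.List.sorted s pvKey false = pvTarget s := by
  induction s using List.reverseRecOn with
  | nil => simp [pvTarget]; decide
  | append_singleton s x ih =>
    have hnd : s.Nodup := h.of_append_left
    have hxs : x ∉ s := fun hx =>
      (List.disjoint_of_nodup_append h) hx (List.mem_singleton_self x)
    rw [PySem.List.sorted_eq_foldl_insertBy, List.foldl_append, ← PySem.List.sorted_eq_foldl_insertBy,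
      ih hnd]
    simp only [List.foldl_cons, List.foldl_nil]
    by_cases hxp : x ∈ pvPreferred
    · -- x is a preferred key: it is inserted among the preferred keys at its rank
      obtain ⟨P1, P2, hsplit⟩ := List.append_of_mem hxp
      have pw := pvPreferred_pairwise
      have nd := pvPreferred_nodup
      rw [hsplit] at pw nd
      rw [List.pairwise_append] at pw
      obtain ⟨pw1, pw2, pwrel⟩ := pw
      have hx15 : pvKey x < 15 := pvKey_mem_lt x hxp
      have hT : pvTarget s =
          P1.filter (fun k => s.contains k) ++
            (P2.filter (fun k => s.contains k) ++ s.filter (fun k => !pvPreferred.contains k)) := by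
        unfold pvTarget
        rw [hsplit, List.filter_append, List.filter_cons]
        simp [hxs]
      rw [hT, pvInsertBy_middle (fun a b => decide (pvKey a < pvKey b)) x
        (P1.filter (fun k => s.contains k))
        (P2.filter (fun k => s.contains k) ++ s.filter (fun k => !pvPreferred.contains k))
        ?hA ?hB]
      case hA =>
        intro a ha
        have ha' : a ∈ P1 := List.mem_of_mem_filter ha
        have : pvKey a < pvKey x := pwrel a ha' x (List.mem_cons_self)
        simp; omega
      case hB =>
        intro b hb
        rcases List.mem_append.mp hb with hb | hb
        · have hb' : b ∈ P2 := List.mem_of_mem_filter hb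
          have : pvKey x < pvKey b := (List.pairwise_cons.mp pw2).1 b hb'
          simp; omega
        · have hbn : b ∉ pvPreferred := by
            have := (List.mem_filter.mp hb).2
            simpa [List.contains_eq_mem] using this
          have : pvKey b = 15 := pvKey_not_mem hbn
          simp; omega
      -- now compute pvTarget (s ++ [x])
      have hP1 : P1.filter (fun k => (s ++ [x]).contains k) = P1.filter (fun k => s.contains k) := by
        apply List.filter_congr
        intro k hk
        have hkx : k ≠ x := by
          rintro rfl
          exact (List.disjoint_of_nodup_append nd) hk (List.mem_cons_self)
        simp [List.contains_eq_mem, hkx]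
      have hP2 : P2.filter (fun k => (s ++ [x]).contains k) = P2.filter (fun k => s.contains k) := by
        apply List.filter_congr
        intro k hk
        have hkx : k ≠ x := by
          rintro rfl
          exact (List.nodup_cons.mp (List.nodup_append.mp nd).2.1).1 hk
        simp [List.contains_eq_mem, hkx]
      have hE : (s ++ [x]).filter (fun k => !pvPreferred.contains k) =
          s.filter (fun k => !pvPreferred.contains k) := by
        rw [List.filter_append]
        simp [hxp]
      have hPref : pvPreferred.filter (fun k => (s ++ [x]).contains k) =
          P1.filter (fun k => s.contains k) ++ x :: P2.filter (fun k => s.contains k) := by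
        conv_lhs => rw [hsplit]
        rw [List.filter_append, List.filter_cons, hP1, hP2]
        simp
      unfold pvTarget
      rw [hPref, hE]
      simp
    · -- x is not preferred: it has the maximal key and goes to the end
      have hx15 : pvKey x = 15 := pvKey_not_mem hxp
      rw [PySem.List.insertBy_of_forall_not_before]
      · unfold pvTarget
        have hPf : pvPreferred.filter (fun k => (s ++ [x]).contains k) =
            pvPreferred.filter (fun k => s.contains k) := by
          apply List.filter_congr
          intro k hk
          have hkx : k ≠ x := by rintro rfl; exact hxp hk
          simp [List.contains_eq_mem, hkx]
        have hE : (s ++ [x]).filter (fun k => !pvPreferred.contains k) =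
            s.filter (fun k => !pvPreferred.contains k) ++ [x] := by
          rw [List.filter_append]
          simp [hxp]
        rw [hPf, hE, List.append_assoc]
      · intro y _
        have := pvKey_le y
        simp [hx15]; omega

-- A's extend loop on a nodup list is append of the not-yet-present keys
theorem pvFA_extend (l : List String) (o : List String) (hl : l.Nodup) :
    l.foldl (fun o k => if o.contains k then o else o ++ [k]) o
      = o ++ l.filter (fun k => !o.contains k) := by
  induction l generalizing o with
  | nil => simp
  | cons k l ih =>
    rcases List.nodup_cons.mp hl with ⟨hk, hl'⟩
    simp only [List.foldl_cons]
    by_cases hc : o.contains k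
    · have hk' : k ∈ o := by simpa [List.contains_eq_mem] using hc
      rw [if_pos hc, ih o hl', List.filter_cons]
      simp [hk']
    · have hthis : l.filter (fun x => !(o ++ [k]).contains x)
          = l.filter (fun x => !o.contains x) := by
        apply List.filter_congr
        intro x hx
        have hxk : x ≠ k := fun h => hk (h ▸ hx)
        simp [List.contains_eq_mem, hxk]
      have hk' : k ∉ o := by simpa [List.contains_eq_mem] using hc
      rw [if_neg hc, ih (o ++ [k]) hl', hthis, List.filter_cons]
      simp [hk']

-- ===== VERDICT =====
theorem select_live_scorings_fields_py_spec : Claim_equal_select_live_scorings_fields_py := by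
  intro rows _
  show select_live_scorings_fields_py rows = select_live_scorings_fields_py_alt rows
  unfold select_live_scorings_fields_py select_live_scorings_fields_py_alt
  -- the B port's rank dict and key function
  have hrank : ((PySem.List.enumerate pvPreferred).foldl
      (fun d p => d.insert p.2 p.1) PySem.Dict.empty : PySem.Dict String Int) = pvRankDict := by
    decide
  have hkey : (fun k => PySem.Dict.getD pvRankDict k ((pvPreferred.length : Int))) = pvKey := by
    funext k; rfl
  -- both key-collection loops produce PySem.Set.ofList of the flattened key stream
  have hBkeys : ∀ rs : List (List (String × String)),
      (rs.foldl (fun d r => r.foldl (fun d kv => d.insert kv.1 (none : Option Unit)) d)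
        PySem.Dict.empty).keys = PySem.Set.ofList (rs.flatten.map (fun kv => kv.1)) := by
    intro rs
    rw [← List.foldl_flatten]
    rw [PySem.Dict.keys_foldl_insert_key rs.flatten (fun kv => kv.1) (fun _ _ => none)
      PySem.Dict.empty]
    rw [PySem.Dict.keys_empty, PySem.Set.update_nil_left]
  have hAkeys : ∀ rs : List (List (String × String)),
      rs.foldl (fun acc r =>
        r.foldl (fun a (kv : String × String) =>
          if a.contains kv.1 then a else a ++ [kv.1]) acc) ([] : List String) =
      PySem.Set.ofList (rs.flatten.map (fun kv => kv.1)) := by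
    intro rs
    rw [← List.foldl_flatten]
    have : rs.flatten.foldl (fun a (kv : String × String) =>
        if a.contains kv.1 then a else a ++ [kv.1]) ([] : List String) =
        rs.flatten.foldl (fun s kv => PySem.Set.add s kv.1) ([] : List String) := by
      apply PySem.List.foldl_congr_mem
      intro acc kv _
      simp [PySem.Set.add, PySem.Set.contains]
    rw [this, ← PySem.Set.update_map_eq_foldl_add, PySem.Set.update_nil_left]
  by_cases hrows : rows = []
  · subst hrows; rfl
  · simp only [hrows, if_false, hrank, hkey, hBkeys, hAkeys]
    set s := PySem.Set.ofList (rows.flatten.map (fun kv => kv.1)) with hs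
    have hnodup : List.Nodup s := PySem.Set.nodup_ofList _
    rw [pvSorted_target s hnodup, pvFA_extend s _ hnodup]
    unfold pvTarget
    congr 1
    apply List.filter_congr
    intro x hx
    have h1 : (List.filter (fun k => List.contains s k) pvPreferred).contains x
         = pvPreferred.contains x := by
      simp [List.contains_eq_mem, List.mem_filter, hx]
    rw [h1]
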